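-- pv_equiv track=rewrite | github.com/petar-popovic-bg/Jerteh | Text/text.py | yusclat_to_lat
-- ===== SOURCE A (Python) =====
-- def yusclat_to_lat(text):
--     """
--     Converts YUSCII latin text to sr-latin script.
--
--     :param text: string
--     :return: string
--     """
--     dic = {
--         '~': 'č',
--         '}': 'ć',
--         '{': 'š',
--         '`': 'ž',
--         '|': 'đ',
--         '^': 'Č',
--         ']': 'Ć',
--         '[': 'Š',
--         '@': 'Ž',
--         '\\': 'Đ'
--     }
--     for key in dic.keys():
--         text = text.replace(key, dic[key])
--     return text
-- ===== SOURCE B (Python) =====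
-- def _lat(c):
--     if c == '~': return 'č'
--     elif c == '}': return 'ć'
--     elif c == '{': return 'š'
--     elif c == '`': return 'ž'
--     elif c == '|': return 'đ'
--     elif c == '^': return 'Č'
--     elif c == ']': return 'Ć'
--     elif c == '[': return 'Š'
--     elif c == '@': return 'Ž'
--     elif c == '\\': return 'Đ'
--     else: return c
--
--
-- def yusclat_to_lat(text):
--     """
--     Converts YUSCII latin text to sr-latin script.
--
--     Single pass with an explicit accumulator: each character is decided by an
--     if/elif chain (no dict, no full-string replace passes).
--     """
--     out = []
--     for c in text:
--         out.append(_lat(c))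
--     return ''.join(out)
-- ===== Notes on version B (the rewrite author's own statement) =====
-- stated objective: alternative
-- what changed: Drops the mapping dict and the ten sequential full-string str.replace passes entirely: B makes one pass over the text with an explicit accumulator, deciding each character by an if/elif chain.
import Mathlib
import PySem

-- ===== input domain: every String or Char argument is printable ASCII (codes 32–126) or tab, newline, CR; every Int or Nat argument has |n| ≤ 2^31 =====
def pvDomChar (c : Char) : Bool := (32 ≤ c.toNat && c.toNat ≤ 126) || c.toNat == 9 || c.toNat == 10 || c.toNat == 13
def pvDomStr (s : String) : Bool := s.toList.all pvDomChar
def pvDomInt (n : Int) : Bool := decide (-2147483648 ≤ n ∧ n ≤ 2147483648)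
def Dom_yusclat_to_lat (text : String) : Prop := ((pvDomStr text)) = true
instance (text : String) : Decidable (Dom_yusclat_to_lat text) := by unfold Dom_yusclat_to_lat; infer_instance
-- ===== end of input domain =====

-- B drops A's dict and its ten sequential full-string replace passes for ONE accumulator pass with an if/elif chain per character (objective: alternative).

-- ===== PORT A =====
-- A builds a dict of 1-char strings and runs text.replace(key, dic[key]) for each key in
-- insertion order.  All keys and values are single characters, so the dict is ported at Char
-- granularity (exact); each replace call wraps its key/value back into the 1-char string.
-- dic[key] never raises (key comes from dic.keys()); getD's default is never used.
def dicA : PySem.Dict Char Char := PySem.Dict.ofList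
  [('~', 'č'), ('}', 'ć'), ('{', 'š'), ('`', 'ž'), ('|', 'đ'),
   ('^', 'Č'), (']', 'Ć'), ('[', 'Š'), ('@', 'Ž'), ('\\', 'Đ')]

def yusclat_to_lat (text : String) : String :=
  dicA.keys.foldl
    (fun t key => PySem.Str.replace t (String.ofList [key]) (String.ofList [(dicA.get? key).getD key]))
    text

-- ===== PORT B =====
-- B's helper _lat: the if/elif chain deciding one character.
def latChar (c : Char) : Char :=
  if c = '~' then 'č'
  else if c = '}' then 'ć'
  else if c = '{' then 'š'
  else if c = '`' then 'ž'
  else if c = '|' then 'đ'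
  else if c = '^' then 'Č'
  else if c = ']' then 'Ć'
  else if c = '[' then 'Š'
  else if c = '@' then 'Ž'
  else if c = '\\' then 'Đ'
  else c

-- B's loop: the accumulator list 'out' grows by append; ported as the reversed cons
-- accumulator, reversed at the end ('.join of the appended list is exact).
def latGo : List Char → List Char → List Char
  | [], acc => acc.reverse
  | c :: rest, acc => latGo rest (latChar c :: acc)

def yusclat_to_lat_alt (text : String) : String :=
  String.ofList (latGo text.toList [])

-- ===== PRECONDITION & SPEC =====
def Spec_yusclat_to_lat (text : String) (out : String) : Prop := out = yusclat_to_lat_alt text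
instance (text : String) (out : String) : Decidable (Spec_yusclat_to_lat text out) := by unfold Spec_yusclat_to_lat; infer_instance

-- ===== CLAIM (what is proved, stated in full; the proofs are below) =====
def Claim_equal_yusclat_to_lat : Prop := ∀ (text : String), Dom_yusclat_to_lat text → Spec_yusclat_to_lat text (yusclat_to_lat text)

-- ===== LEMMAS AND PROOFS =====

-- one single-character substitution, pointwise
def sub (k v : Char) (c : Char) : Char := if c = k then v else c

-- A single-character replace is a pointwise map over the characters.
lemma go_single (k v : Char) : ∀ (l acc : List Char) (fuel : Nat), l.length ≤ fuel →
    PySem.Chars.replace.go [k] [v] fuel l acc = acc.reverse ++ l.map (sub k v) := by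
  intro l
  induction l with
  | nil => intro acc fuel _; cases fuel <;> simp [PySem.Chars.replace.go]
  | cons c t ih =>
    intro acc fuel h
    cases fuel with
    | zero => simp at h
    | succ fuel =>
      simp only [PySem.Chars.replace.go]
      by_cases hc : c = k
      · subst hc
        have hp : List.isPrefixOf [c] (c :: t) = true := by simp [List.isPrefixOf]
        rw [if_pos hp]
        simp [ih (v :: acc) fuel (by simpa using h), sub]
      · have hp : List.isPrefixOf [k] (c :: t) = false := by
          simp [List.isPrefixOf]; exact fun h' => (hc h'.symm).elim
        rw [if_neg (by simp [hp])]
        simp [ih (c :: acc) fuel (by simpa using h), sub, hc]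

lemma replace_single (s : List Char) (k v : Char) :
    PySem.Chars.replace s [k] [v] = s.map (sub k v) := by
  simp [PySem.Chars.replace, go_single k v s [] s.length le_rfl]

-- the ten substitutions applied in A's order, composed on one character,
-- equal B's if/elif chain
lemma comp_char (c : Char) :
    sub '\\' 'Đ' (sub '@' 'Ž' (sub '[' 'Š' (sub ']' 'Ć' (sub '^' 'Č' (sub '|' 'đ'
      (sub '`' 'ž' (sub '{' 'š' (sub '}' 'ć' (sub '~' 'č' c)))))))))
    = latChar c := by
  by_cases h1 : c = '~'; · subst h1; rfl
  by_cases h2 : c = '}'; · subst h2; rfl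
  by_cases h3 : c = '{'; · subst h3; rfl
  by_cases h4 : c = '`'; · subst h4; rfl
  by_cases h5 : c = '|'; · subst h5; rfl
  by_cases h6 : c = '^'; · subst h6; rfl
  by_cases h7 : c = ']'; · subst h7; rfl
  by_cases h8 : c = '['; · subst h8; rfl
  by_cases h9 : c = '@'; · subst h9; rfl
  by_cases h10 : c = '\\'; · subst h10; rfl
  simp [sub, latChar, h1, h2, h3, h4, h5, h6, h7, h8, h9, h10]

-- B's accumulator loop is the map of latChar
lemma latGo_eq (l : List Char) : ∀ acc, latGo l acc = acc.reverse ++ l.map latChar := by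
  induction l with
  | nil => intro acc; simp [latGo]
  | cons c t ih => intro acc; simp [latGo, ih]

-- the ten map passes collapse into one latChar pass
lemma chain_eq (l : List Char) :
    List.map (sub '\\' 'Đ') (List.map (sub '@' 'Ž') (List.map (sub '[' 'Š')
      (List.map (sub ']' 'Ć') (List.map (sub '^' 'Č') (List.map (sub '|' 'đ')
      (List.map (sub '`' 'ž') (List.map (sub '{' 'š') (List.map (sub '}' 'ć')
      (List.map (sub '~' 'č') l)))))))))
    = List.map latChar l := by
  induction l with
  | nil => simp
  | cons c t ih =>
    simp only [List.map_cons]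
    rw [ih, comp_char c]

-- ===== VERDICT (by name: the statement is the Claim_ definition above) =====
theorem yusclat_to_lat_spec : Claim_equal_yusclat_to_lat := by
  intro text _
  show yusclat_to_lat text = yusclat_to_lat_alt text
  apply String.toList_injective
  have hA : yusclat_to_lat text =
      PySem.Str.replace (PySem.Str.replace (PySem.Str.replace (PySem.Str.replace
        (PySem.Str.replace (PySem.Str.replace (PySem.Str.replace (PySem.Str.replace
        (PySem.Str.replace (PySem.Str.replace text (String.ofList ['~']) (String.ofList ['č']))
        (String.ofList ['}']) (String.ofList ['ć']))
        (String.ofList ['{']) (String.ofList ['š']))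
        (String.ofList ['`']) (String.ofList ['ž']))
        (String.ofList ['|']) (String.ofList ['đ']))
        (String.ofList ['^']) (String.ofList ['Č']))
        (String.ofList [']']) (String.ofList ['Ć']))
        (String.ofList ['[']) (String.ofList ['Š']))
        (String.ofList ['@']) (String.ofList ['Ž']))
        (String.ofList ['\\']) (String.ofList ['Đ']) := rfl
  rw [hA]
  simp only [PySem.Str.toList_replace, String.toList_ofList]
  simp only [replace_single]
  rw [chain_eq]
  simp [yusclat_to_lat_alt, latGo_eq]
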